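-- pv_equiv track=rewrite | github.com/eliminator15/PythonAdvancedHomework | 02/숙제.py | solution
-- ===== SOURCE A (Python) =====
-- def solution(calorie):
--     answer = 0
--     min_cal = 1000
--
--     for cal in calorie:
--         if cal > min_cal:
--             answer += (cal - min_cal)
--         else:
--             min_cal = cal
--
--     return answer
-- ===== SOURCE B (Python) =====
-- def solution(calorie):
--     mins = []
--     m = 1000
--     for c in calorie:
--         mins.append(m)
--         m = min(m, c)
--     return sum(max(0, c - mm) for c, mm in zip(calorie, mins))
-- ===== Notes on version B (the rewrite author's own statement) =====
-- stated objective: alternative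
-- what changed: Replaces A's single fused loop (branch that either accumulates the excess or lowers the running minimum) with two separate phases: first build the running-minimum table aligned with each element, then sum max(0, c - m) over the zipped pairs.
import Mathlib
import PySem

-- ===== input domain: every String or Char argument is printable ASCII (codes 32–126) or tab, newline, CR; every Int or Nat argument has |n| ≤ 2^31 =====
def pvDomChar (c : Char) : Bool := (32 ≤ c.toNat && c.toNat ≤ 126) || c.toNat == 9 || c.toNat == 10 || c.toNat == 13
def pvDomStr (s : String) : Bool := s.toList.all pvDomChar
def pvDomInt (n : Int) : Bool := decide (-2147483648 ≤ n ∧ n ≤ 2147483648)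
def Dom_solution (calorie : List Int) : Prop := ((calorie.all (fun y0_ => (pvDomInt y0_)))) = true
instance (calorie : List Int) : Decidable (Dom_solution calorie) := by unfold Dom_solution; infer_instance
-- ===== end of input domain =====

-- B: two-phase alternative (prefix-min table, then sum of excesses) instead of A's fused single loop; same O(n) cost.

-- ===== PORT A =====
-- A's loop over (answer, min_cal)
def solution (calorie : List Int) : Int :=
  (calorie.foldl
    (fun (s : Int × Int) cal =>
      if cal > s.2 then (s.1 + (cal - s.2), s.2) else (s.1, cal))
    (0, 1000)).1

-- ===== PORT B =====
-- B's first loop: mins.append(m); m = min(m, c)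
def buildMins (m : Int) : List Int → List Int
  | [] => []
  | c :: cs => m :: buildMins (min m c) cs

def solution_alt (calorie : List Int) : Int :=
  (((calorie.zip (buildMins 1000 calorie)).map (fun p => max 0 (p.1 - p.2)))).sum

-- ===== PRECONDITION & SPEC =====
def Spec_solution (calorie : List Int) (out : Int) : Prop := out = solution_alt calorie
instance (calorie : List Int) (out : Int) : Decidable (Spec_solution calorie out) := by unfold Spec_solution; infer_instance

-- ===== CLAIM (what is proved, stated in full; the proofs are below) =====
def Claim_equal_solution : Prop := ∀ (calorie : List Int), Dom_solution calorie → Spec_solution calorie (solution calorie)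

-- ===== LEMMAS AND PROOFS =====
theorem solution_loop_eq (cs : List Int) (a m : Int) :
    (cs.foldl
      (fun (s : Int × Int) cal =>
        if cal > s.2 then (s.1 + (cal - s.2), s.2) else (s.1, cal))
      (a, m)).1
    = a + ((cs.zip (buildMins m cs)).map (fun p => max 0 (p.1 - p.2))).sum := by
  induction cs generalizing a m with
  | nil => simp [buildMins]
  | cons c cs ih =>
    simp only [List.foldl_cons, buildMins, List.zip_cons_cons, List.map_cons, List.sum_cons]
    by_cases h : c > m
    · rw [if_pos h, ih]
      have : max 0 (c - m) = c - m := by omega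
      have : min m c = m := by omega
      simp_all; omega
    · rw [if_neg h, ih]
      have : max 0 (c - m) = 0 := by omega
      have : min m c = c := by omega
      simp_all

-- ===== VERDICT (by name: the statement is the Claim_ definition above) =====
theorem solution_spec : Claim_equal_solution := by
  intro calorie _
  unfold Spec_solution solution solution_alt
  rw [solution_loop_eq]; omega
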